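-- pv_equiv track=rewrite | github.com/LykkeCorp/ATTMO_python | postprocess/postprocess.py | find_first_non_zero_indices
-- ===== SOURCE A (Python) =====
-- def find_first_non_zero_indices(lst):
--     non_zero_indices = []
--     series_started = False
--     for i, num in enumerate(lst):
--         if num != 0 and not series_started:
--             non_zero_indices.append(i)
--             series_started = True
--         elif num == 0:
--             series_started = False
--     return non_zero_indices
-- ===== SOURCE B (Python) =====
-- def find_first_non_zero_indices(lst):
--     # stage 1: run-length encode lst into (is_nonzero, run_length) groups
--     groups = []
--     i = 0
--     while i < len(lst):
--         key = lst[i] != 0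
--         run = 1
--         while i + run < len(lst) and (lst[i + run] != 0) == key:
--             run += 1
--         groups.append((key, run))
--         i += run
--     # stage 2: prefix-sum the run lengths; emit the offsets of the non-zero groups
--     starts = []
--     offset = 0
--     for key, length in groups:
--         if key:
--             starts.append(offset)
--         offset += length
--     return starts
-- ===== Notes on version B (the rewrite author's own statement) =====
-- stated objective: alternative
-- what changed: Replaces the single stateful flag-scan with a two-stage pipeline: first run-length encode the list into (is_nonzero, length) groups, then prefix-sum the group lengths and emit the offsets of the non-zero groups.
import Mathlib
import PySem

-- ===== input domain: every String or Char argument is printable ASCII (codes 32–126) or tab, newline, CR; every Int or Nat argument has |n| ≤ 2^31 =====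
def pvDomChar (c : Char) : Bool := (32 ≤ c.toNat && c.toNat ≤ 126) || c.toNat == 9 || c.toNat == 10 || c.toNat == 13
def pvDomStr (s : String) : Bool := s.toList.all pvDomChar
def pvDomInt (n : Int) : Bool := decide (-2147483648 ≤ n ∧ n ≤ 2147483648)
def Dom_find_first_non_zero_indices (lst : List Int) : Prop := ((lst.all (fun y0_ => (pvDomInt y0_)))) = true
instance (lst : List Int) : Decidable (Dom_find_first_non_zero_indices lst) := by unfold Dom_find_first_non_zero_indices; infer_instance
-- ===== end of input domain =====

-- B replaces A's stateful flag-scan with a two-stage pipeline (run-length encoding, then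
-- offsets of the non-zero groups); same return value, proved equal on the whole domain.


-- ===== PORT A =====
-- One recursive step per loop iteration: same branches, index i and the flag carried as state.
def findGoA : List Int → Nat → Bool → List Int
  | [], _, _ => []
  | num :: rest, i, series_started =>
    if num ≠ 0 ∧ series_started = false then
      (i : Int) :: findGoA rest (i + 1) true
    else if num = 0 then
      findGoA rest (i + 1) false
    else
      findGoA rest (i + 1) series_started

def find_first_non_zero_indices (lst : List Int) : List Int :=
  findGoA lst 0 false

-- ===== PORT B =====
-- Stage 1 of B (_rle): run-length encode into (is_nonzero, run_length) groups; the Python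
-- while-loop counts the run, ported as the length of the matching takeWhile prefix (exact:
-- both count how many leading elements of the tail share the key).
def rleB : List Int → List (Bool × Nat)
  | [] => []
  | x :: xs =>
    let key : Bool := decide (x ≠ 0)
    let run : Nat := 1 + (xs.takeWhile (fun y => decide (y ≠ 0) == key)).length
    (key, run) :: rleB ((x :: xs).drop run)
termination_by l => l.length
decreasing_by
  simp [List.length_drop]

-- Stage 2 of B: one fold over the groups carrying (starts, offset), appending the
-- offset of each non-zero group, as the Python for-loop does.
def find_first_non_zero_indices_alt (lst : List Int) : List Int :=
  ((rleB lst).foldl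
    (fun (st : List Int × Nat) g =>
      (if g.1 then st.1 ++ [(st.2 : Int)] else st.1, st.2 + g.2))
    ([], 0)).1

-- ===== PRECONDITION & SPEC =====
def Spec_find_first_non_zero_indices (lst : List Int) (out : List Int) : Prop := out = find_first_non_zero_indices_alt lst
instance (lst : List Int) (out : List Int) : Decidable (Spec_find_first_non_zero_indices lst out) := by unfold Spec_find_first_non_zero_indices; infer_instance

-- ===== CLAIM (what is proved, stated in full; the proofs are below) =====
def Claim_equal_find_first_non_zero_indices : Prop := ∀ (lst : List Int), Dom_find_first_non_zero_indices lst → Spec_find_first_non_zero_indices lst (find_first_non_zero_indices lst)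

-- ===== LEMMAS AND PROOFS =====

-- Proof-side recursive form of B's stage-2 fold (front-building, easier to induct on).
def startsB : List (Bool × Nat) → Nat → List Int
  | [], _ => []
  | (key, length) :: gs, offset =>
    let rest := startsB gs (offset + length)
    if key then (offset : Int) :: rest else rest

-- B's stage-2 fold accumulates exactly startsB behind the starts already collected.
theorem foldl_starts_eq (gs : List (Bool × Nat)) :
    ∀ (acc : List Int) (offset : Nat),
      (gs.foldl
        (fun (st : List Int × Nat) g =>
          (if g.1 then st.1 ++ [(st.2 : Int)] else st.1, st.2 + g.2))
        (acc, offset)).1 = acc ++ startsB gs offset := by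
  induction gs with
  | nil => intro acc offset; simp [startsB]
  | cons g gs ih =>
    intro acc offset
    obtain ⟨key, length⟩ := g
    rcases key with _ | _ <;>
      simp [List.foldl_cons, startsB, ih]

-- rleB's cons equation with the drop pushed into the tail.
theorem rleB_cons (x : Int) (xs : List Int) :
    rleB (x :: xs) =
      (decide (x ≠ 0), 1 + (xs.takeWhile (fun y => decide (y ≠ 0) == decide (x ≠ 0))).length)
        :: rleB (xs.drop (xs.takeWhile (fun y => decide (y ≠ 0) == decide (x ≠ 0))).length) := by
  rw [rleB.eq_def]
  simp only []
  rw [Nat.add_comm, List.drop_succ_cons]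

-- A's loop skips a block of zeros with the flag down, only advancing the index.
theorem findGoA_skip_zeros (run rest : List Int) (i : Nat)
    (h : ∀ y ∈ run, y = 0) :
    findGoA (run ++ rest) i false = findGoA rest (i + run.length) false := by
  induction run generalizing i with
  | nil => simp
  | cons z zs ih =>
    have hz : z = 0 := h z (by simp)
    have hstep : findGoA ((z :: zs) ++ rest) i false = findGoA (zs ++ rest) (i + 1) false := by
      simp [findGoA, hz]
    rw [hstep, ih (i + 1) (fun y hy => h y (by simp [hy])), List.length_cons]
    congr 1
    omega

-- A's loop skips a block of non-zeros with the flag up, only advancing the index.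
theorem findGoA_skip_nonzeros (run rest : List Int) (i : Nat)
    (h : ∀ y ∈ run, y ≠ 0) :
    findGoA (run ++ rest) i true = findGoA rest (i + run.length) true := by
  induction run generalizing i with
  | nil => simp
  | cons z zs ih =>
    have hz : z ≠ 0 := h z (by simp)
    have hstep : findGoA ((z :: zs) ++ rest) i true = findGoA (zs ++ rest) (i + 1) true := by
      simp [findGoA, hz]
    rw [hstep, ih (i + 1) (fun y hy => h y (by simp [hy])), List.length_cons]
    congr 1
    omega

-- When the next element is zero (or the list ends) the flag's value is irrelevant.
theorem findGoA_flag_reset (rest : List Int) (i : Nat)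
    (h : rest = [] ∨ ∃ z zs, rest = z :: zs ∧ z = 0) :
    findGoA rest i true = findGoA rest i false := by
  rcases h with h | ⟨z, zs, rfl, rfl⟩
  · subst h; rfl
  · simp [findGoA]

-- A takeWhile prefix followed by the drop of its length is the whole list.
theorem takeWhile_append_drop (p : Int → Bool) :
    ∀ xs : List Int, xs.takeWhile p ++ xs.drop (xs.takeWhile p).length = xs
  | [] => rfl
  | x :: xs => by
    by_cases h : p x
    · simp [h, takeWhile_append_drop p xs]
    · simp [h]

-- Dropping the takeWhile prefix is dropWhile.
theorem drop_takeWhile_eq_dropWhile (p : Int → Bool) :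
    ∀ xs : List Int, xs.drop (xs.takeWhile p).length = xs.dropWhile p
  | [] => rfl
  | x :: xs => by
    by_cases h : p x <;>
      simp [h, drop_takeWhile_eq_dropWhile p xs]

-- Shape of the remainder after a run: empty, or starting with an element of the other kind.
theorem drop_run_head (x : Int) (xs : List Int) :
    xs.drop (xs.takeWhile (fun y => decide (y ≠ 0) == decide (x ≠ 0))).length = [] ∨
    ∃ z zs, xs.drop (xs.takeWhile (fun y => decide (y ≠ 0) == decide (x ≠ 0))).length = z :: zs ∧
      (decide (z ≠ 0) == decide (x ≠ 0)) = false := by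
  rw [drop_takeWhile_eq_dropWhile]
  rcases hd : xs.dropWhile (fun y => decide (y ≠ 0) == decide (x ≠ 0)) with _ | ⟨z, zs⟩
  · exact Or.inl rfl
  · refine Or.inr ⟨z, zs, rfl, ?_⟩
    have hne : xs.dropWhile (fun y => decide (y ≠ 0) == decide (x ≠ 0)) ≠ [] := by
      rw [hd]; exact List.cons_ne_nil z zs
    have h2 := List.head_dropWhile_not (fun y => decide (y ≠ 0) == decide (x ≠ 0)) hne
    simp only [hd, List.head_cons] at h2
    exact h2

-- Main invariant: A's scan started at index i with the flag down equals B's pipeline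
-- offset by i.  Strong induction on the list length (B consumes a whole run per step).
theorem findGoA_eq_startsB (n : Nat) : ∀ (lst : List Int), lst.length ≤ n →
    ∀ (i : Nat), findGoA lst i false = startsB (rleB lst) i := by
  induction n with
  | zero =>
    intro lst hl i
    rw [List.length_eq_zero_iff.mp (Nat.le_zero.mp hl), rleB.eq_def]
    rfl
  | succ n ih =>
    intro lst hl i
    rcases lst with _ | ⟨x, xs⟩
    · rw [rleB.eq_def]; rfl
    · rw [rleB_cons]
      have hxs : xs.takeWhile (fun y => decide (y ≠ 0) == decide (x ≠ 0)) ++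
          xs.drop (xs.takeWhile (fun y => decide (y ≠ 0) == decide (x ≠ 0))).length = xs :=
        takeWhile_append_drop _ xs
      set t := xs.takeWhile (fun y => decide (y ≠ 0) == decide (x ≠ 0)) with ht
      set d := xs.drop t.length with hdd
      have hdle : d.length ≤ n := by
        have h1 : d.length ≤ xs.length := by rw [hdd]; simp
        simp only [List.length_cons] at hl
        omega
      have hhead := drop_run_head x xs
      by_cases hx : x = 0
      · -- zero-keyed run: A skips x then the zero run; B skips the group.
        have hkey : decide (x ≠ 0) = false := by simp [hx]
        have ht0 : ∀ y ∈ t, y = 0 := by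
          intro y hy
          have := List.mem_takeWhile_imp hy
          simpa [hkey] using this
        have hstep : findGoA (x :: xs) i false = findGoA xs (i + 1) false := by
          simp [findGoA, hx]
        rw [hstep]
        conv_lhs => rw [← hxs]
        rw [findGoA_skip_zeros t d (i + 1) ht0, startsB]
        simp only [hkey, Bool.false_eq_true, if_false]
        rw [show i + (1 + t.length) = i + 1 + t.length from by omega]
        exact ih d hdle (i + 1 + t.length)
      · -- non-zero-keyed run: A emits i, skips the run with the flag up, then resets.
        have hkey : decide (x ≠ 0) = true := by simp [hx]
        have ht1 : ∀ y ∈ t, y ≠ 0 := by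
          intro y hy
          have := List.mem_takeWhile_imp hy
          simpa [hkey] using this
        have hreset : d = [] ∨ ∃ z zs, d = z :: zs ∧ z = 0 := by
          rcases hhead with h | ⟨z, zs, hz, hzk⟩
          · exact Or.inl h
          · refine Or.inr ⟨z, zs, hz, ?_⟩
            simpa [hkey] using hzk
        have hstep : findGoA (x :: xs) i false = (i : Int) :: findGoA xs (i + 1) true := by
          simp [findGoA, hx]
        rw [hstep]
        conv_lhs => rw [← hxs]
        rw [findGoA_skip_nonzeros t d (i + 1) ht1,
          findGoA_flag_reset d (i + 1 + t.length) hreset, startsB]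
        simp only [hkey, if_pos]
        rw [show i + (1 + t.length) = i + 1 + t.length from by omega]
        rw [ih d hdle (i + 1 + t.length)]

-- ===== VERDICT (by name: the statement is the Claim_ definition above) =====
theorem find_first_non_zero_indices_spec : Claim_equal_find_first_non_zero_indices := by
  intro lst _
  unfold Spec_find_first_non_zero_indices find_first_non_zero_indices find_first_non_zero_indices_alt
  rw [foldl_starts_eq (rleB lst) [] 0, List.nil_append]
  exact findGoA_eq_startsB lst.length lst le_rfl 0
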